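-- pv_equiv track=rewrite | github.com/eliottcassidy2000/math | 04-computation/nonham_vanish_uniform.py | check_nonham_for_pair
-- ===== SOURCE A (Python) =====
-- from itertools import permutations, combinations
--
-- def check_nonham_for_pair(T, n, a, b):
--     """Check if NONHAM(a,b) = 0 for given tournament T."""
--     U = [v for v in range(n) if v != a and v != b]
--     nonham_sum = 0
--
--     for mask in range(1 << len(U)):
--         S_list = [U[k] for k in range(len(U)) if mask & (1 << k)]
--         R = [U[k] for k in range(len(U)) if not (mask & (1 << k))]
--         sign = (-1)**len(S_list)
--         S_set = sorted(set(S_list) | {a})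
--         R_set = sorted(set(R) | {b})
--
--         for p in permutations(S_set):
--             if p[-1] != a: continue
--             p_valid = all(T.get((p[k], p[k+1]), 0) == 1 for k in range(len(p)-1))
--             if not p_valid: continue
--
--             for q in permutations(R_set):
--                 if q[0] != b: continue
--                 q_valid = all(T.get((q[k], q[k+1]), 0) == 1 for k in range(len(q)-1))
--                 if not q_valid: continue
--
--                 concat = list(p) + list(q)
--                 is_ham = all(T.get((concat[k], concat[k+1]), 0) == 1 for k in range(len(concat)-1))
--                 if not is_ham:
--                     nonham_sum += sign
--
--     return nonham_sum
-- ===== SOURCE B (Python) =====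
-- def check_nonham_for_pair(T, n, a, b):
--     """NONHAM(a,b): early exit if the edge a->b is present (then every valid
--     (p,q) split concatenates to a Hamiltonian path, so the sum is 0); otherwise
--     per subset multiply two independent recursive path COUNTS instead of
--     pairing and re-checking all permutations."""
--     if T.get((a, b), 0) == 1:
--         return 0
--
--     def edge(u, v):
--         return T.get((u, v), 0) == 1
--
--     def count_to(rem, prev, target):
--         # orderings of rem that extend the chain at `prev` into a path ending at `target`
--         if not rem:
--             return 1 if prev == target else 0
--         return sum(count_to([y for y in rem if y != x], x, target)
--                    for x in rem if edge(prev, x))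
--
--     def count_from(rem, prev):
--         # orderings of rem that extend the chain at `prev` into a path
--         if not rem:
--             return 1
--         return sum(count_from([y for y in rem if y != x], x)
--                    for x in rem if edge(prev, x))
--
--     U = [v for v in range(n) if v != a and v != b]
--     total = 0
--     for mask in range(1 << len(U)):
--         S_list = [U[k] for k in range(len(U)) if mask & (1 << k)]
--         R = [U[k] for k in range(len(U)) if not (mask & (1 << k))]
--         S_set = sorted(set(S_list) | {a})
--         R_set = sorted(set(R) | {b})
--         P = sum(count_to([y for y in S_set if y != x], x, a) for x in S_set)
--         Q = count_from([y for y in R_set if y != b], b)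
--         total += (-1) ** len(S_list) * P * Q
--     return total
-- ===== Notes on version B (the rewrite author's own statement) =====
-- stated objective: alternative
-- what changed: B exits early when the edge a->b is present (every valid split is then Hamiltonian, sum 0) and otherwise, per subset, multiplies two independent recursive path counts (paths ending at a / starting at b, pruning on missing edges) instead of enumerating and pairing all permutations of both sides and re-checking each concatenation.
import Mathlib
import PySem

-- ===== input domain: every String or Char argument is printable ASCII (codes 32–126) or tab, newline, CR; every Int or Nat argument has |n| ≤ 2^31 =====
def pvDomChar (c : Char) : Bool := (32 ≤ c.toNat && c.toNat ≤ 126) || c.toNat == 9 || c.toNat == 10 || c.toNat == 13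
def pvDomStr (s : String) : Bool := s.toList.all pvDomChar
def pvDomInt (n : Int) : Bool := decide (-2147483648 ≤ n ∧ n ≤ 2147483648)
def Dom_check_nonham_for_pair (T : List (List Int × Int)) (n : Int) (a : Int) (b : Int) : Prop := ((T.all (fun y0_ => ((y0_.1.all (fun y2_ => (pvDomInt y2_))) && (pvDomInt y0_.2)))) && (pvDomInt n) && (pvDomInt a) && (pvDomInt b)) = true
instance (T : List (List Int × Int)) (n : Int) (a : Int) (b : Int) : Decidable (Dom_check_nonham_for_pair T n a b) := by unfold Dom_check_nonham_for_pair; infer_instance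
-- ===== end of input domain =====

-- B replaces the per-subset pairing of all permutations p × q (re-checking the
-- concatenation each time) by an early exit on the edge a→b plus the product of
-- two independently computed recursive path counts (alternative algorithm; the
-- 2^|U| subset loop dominates at scale, so no overall speed is claimed).

-- ===== PORT A =====

-- T.get((u, v), 0)
def pvA_get (T : List (List Int × Int)) (u v : Int) : Int :=
  (PySem.Dict.mk T).getD [u, v] 0

-- all(T.get((p[k], p[k+1]), 0) == 1 for k in range(len(p)-1)); the range is a
-- Nat range (len(p)-1 ≥ 0) and p[k] for 0 ≤ k < len(p) is List.getD.
def pvA_pathOk (T : List (List Int × Int)) (p : List Int) : Bool :=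
  (List.range (p.length - 1)).all (fun k => pvA_get T (p.getD k 0) (p.getD (k+1) 0) == 1)

-- itertools.permutations: pick each element as the first, recurse on the rest
-- (for the nodup lists it is applied to, erase-by-value = erase-by-index).
def pvA_perms : List Int → List (List Int)
  | [] => [[]]
  | x0 :: rest =>
      (x0 :: rest).attach.flatMap (fun x => (pvA_perms ((x0 :: rest).erase x.1)).map (x.1 :: ·))
termination_by l => l.length
decreasing_by
  have h := List.length_erase_of_mem x.2
  simp only [List.length_cons] at h ⊢
  omega

def check_nonham_for_pair (T : List (List Int × Int)) (n : Int) (a : Int) (b : Int) : Int :=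
  let U := (PySem.List.pyRange 0 n 1).filter (fun v => v != a && v != b)
  let m := U.length
  -- for mask in range(1 << len(U)) with mask & (1 << k) ported as Nat.testBit
  (List.range (2 ^ m)).foldl (fun acc mask =>
    let S_list := ((List.range m).filter (fun k => mask.testBit k)).map (fun k => U.getD k 0)
    let R := ((List.range m).filter (fun k => !(mask.testBit k))).map (fun k => U.getD k 0)
    let sign : Int := (-1) ^ S_list.length
    let S_set := PySem.List.sorted (PySem.Set.union (PySem.Set.ofList S_list) [a]) (fun x => x) false
    let R_set := PySem.List.sorted (PySem.Set.union (PySem.Set.ofList R) [b]) (fun x => x) false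
    (pvA_perms S_set).foldl (fun acc2 p =>
      if PySem.List.pyGetD p (-1) 0 != a then acc2
      else if !(pvA_pathOk T p) then acc2
      else (pvA_perms R_set).foldl (fun acc3 q =>
        if PySem.List.pyGetD q 0 0 != b then acc3
        else if !(pvA_pathOk T q) then acc3
        else
          let concat := p ++ q
          if !(pvA_pathOk T concat) then acc3 + sign else acc3) acc2) acc) 0

-- ===== PORT B =====

def pvB_edge (T : List (List Int × Int)) (u v : Int) : Bool :=
  (PySem.Dict.mk T).getD [u, v] 0 == 1

-- count_to(rem, prev, target): sum over x in rem with edge(prev, x)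
def pvB_countTo (T : List (List Int × Int)) (target : Int) : List Int → Int → Int
  | [], prev => if prev == target then 1 else 0
  | x0 :: rest, prev =>
      ((x0 :: rest).attach.map (fun x =>
        if pvB_edge T prev x.1 then
          pvB_countTo T target ((x0 :: rest).filter (fun y => y != x.1)) x.1
        else 0)).sum
termination_by rem _ => rem.length
decreasing_by
  have h : (List.filter (fun y => y != x.1) (x0 :: rest)).length < (x0 :: rest).length :=
    List.length_filter_lt_length_iff_exists.mpr ⟨x.1, x.2, by simp⟩
  simp only [List.length_cons] at h ⊢
  omega

def pvB_countFrom (T : List (List Int × Int)) : List Int → Int → Int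
  | [], _ => 1
  | x0 :: rest, prev =>
      ((x0 :: rest).attach.map (fun x =>
        if pvB_edge T prev x.1 then
          pvB_countFrom T ((x0 :: rest).filter (fun y => y != x.1)) x.1
        else 0)).sum
termination_by rem _ => rem.length
decreasing_by
  have h : (List.filter (fun y => y != x.1) (x0 :: rest)).length < (x0 :: rest).length :=
    List.length_filter_lt_length_iff_exists.mpr ⟨x.1, x.2, by simp⟩
  simp only [List.length_cons] at h ⊢
  omega

def check_nonham_for_pair_alt (T : List (List Int × Int)) (n : Int) (a : Int) (b : Int) : Int :=
  if pvB_edge T a b then 0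
  else
    let U := (PySem.List.pyRange 0 n 1).filter (fun v => v != a && v != b)
    let m := U.length
    (List.range (2 ^ m)).foldl (fun acc mask =>
      let S_list := ((List.range m).filter (fun k => mask.testBit k)).map (fun k => U.getD k 0)
      let R := ((List.range m).filter (fun k => !(mask.testBit k))).map (fun k => U.getD k 0)
      let S_set := PySem.List.sorted (PySem.Set.union (PySem.Set.ofList S_list) [a]) (fun x => x) false
      let R_set := PySem.List.sorted (PySem.Set.union (PySem.Set.ofList R) [b]) (fun x => x) false
      let P := (S_set.map (fun x => pvB_countTo T a (S_set.filter (fun y => y != x)) x)).sum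
      let Q := pvB_countFrom T (R_set.filter (fun y => y != b)) b
      acc + (-1) ^ S_list.length * P * Q) 0

-- ===== PRECONDITION & SPEC =====
def Spec_check_nonham_for_pair (T : List (List Int × Int)) (n : Int) (a : Int) (b : Int) (out : Int) : Prop := out = check_nonham_for_pair_alt T n a b
instance (T : List (List Int × Int)) (n : Int) (a : Int) (b : Int) (out : Int) : Decidable (Spec_check_nonham_for_pair T n a b out) := by unfold Spec_check_nonham_for_pair; infer_instance

-- ===== CLAIM (what is proved, stated in full; the proofs are below) =====
def Claim_equal_check_nonham_for_pair : Prop := ∀ (T : List (List Int × Int)) (n : Int) (a : Int) (b : Int), Dom_check_nonham_for_pair T n a b → Spec_check_nonham_for_pair T n a b (check_nonham_for_pair T n a b)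

-- ===== LEMMAS AND PROOFS =====

-- generic sum / foldl shapes
theorem pv_foldl_eq {α : Type} (l : List α) (f : Int → α → Int) (g : α → Int)
    (hf : ∀ acc x, f acc x = acc + g x) (init : Int) :
    l.foldl f init = init + (l.map g).sum := by
  have hfe : f = fun acc x => acc + g x := funext fun acc => funext fun x => hf acc x
  rw [hfe, PySem.List.foldl_add]

theorem pv_sum_flatMap {α β : Type} (l : List α) (f : α → List β) (g : β → Int) :
    ((l.flatMap f).map g).sum = (l.map (fun x => ((f x).map g).sum)).sum := by
  induction l with
  | nil => simp
  | cons x t ih => simp [List.flatMap_cons, ih]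

theorem pv_sum_none (b : Int) (C : Int) :
    ∀ l : List Int, b ∉ l → (l.map (fun y => if y == b then C else 0)).sum = 0 := by
  intro l hb
  induction l with
  | nil => simp
  | cons y t ih =>
    simp only [List.mem_cons, not_or] at hb
    have h1 : (y == b) = false := beq_eq_false_iff_ne.mpr (fun h => hb.1 h.symm)
    rw [List.map_cons, List.sum_cons, if_neg (by simp [h1]), ih hb.2]
    ring

theorem pv_sum_single (b : Int) (C : Int) :
    ∀ l : List Int, l.Nodup → b ∈ l → (l.map (fun y => if y == b then C else 0)).sum = C := by
  intro l hn hb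
  induction l with
  | nil => simp at hb
  | cons y t ih =>
    rcases List.mem_cons.mp hb with h | h
    · subst h
      have hnt : b ∉ t := (List.nodup_cons.mp hn).1
      rw [List.map_cons, List.sum_cons, if_pos (by simp), pv_sum_none b C t hnt]
      ring
    · have h1 : (y == b) = false := beq_eq_false_iff_ne.mpr
        (fun hE => (List.nodup_cons.mp hn).1 (hE ▸ h))
      rw [List.map_cons, List.sum_cons, if_neg (by simp [h1]),
        ih (List.nodup_cons.mp hn).2 h]
      ring

-- pathOk characterisation
theorem pv_pathOk_single (T : List (List Int × Int)) (x : Int) : pvA_pathOk T [x] = true := by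
  simp [pvA_pathOk]

theorem pv_pathOk_cons (T : List (List Int × Int)) (u v : Int) (l : List Int) :
    pvA_pathOk T (u :: v :: l) = ((pvA_get T u v == 1) && pvA_pathOk T (v :: l)) := by
  have hlen : (u :: v :: l).length - 1 = (l.length + 1) := by simp
  have hlen2 : (v :: l).length - 1 = l.length := by simp
  simp only [pvA_pathOk, hlen, hlen2, List.range_succ_eq_map, List.all_cons, List.all_map]
  simp [Function.comp_def, Nat.succ_eq_add_one, List.getD_cons_succ, List.getD_cons_zero]

theorem pv_pathOk_append (T : List (List Int × Int)) :
    ∀ (p q : List Int) (la hb : Int), p.getLast? = some la → q.head? = some hb →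
    pvA_pathOk T (p ++ q) = (pvA_pathOk T p && (pvA_get T la hb == 1) && pvA_pathOk T q) := by
  intro p
  induction p with
  | nil => intro q la hb h; simp at h
  | cons x t ih =>
    intro q la hb hl hh
    cases t with
    | nil =>
      simp only [List.getLast?_singleton, Option.some.injEq] at hl
      subst hl
      obtain ⟨y, q', rfl⟩ := List.exists_cons_of_ne_nil (l := q)
        (fun hq0 => by rw [hq0] at hh; simp at hh)
      simp only [Option.some.injEq, List.head?_cons] at hh
      subst hh
      simp [pv_pathOk_cons, pv_pathOk_single]
    | cons x2 t2 =>
      have hl' : (x2 :: t2).getLast? = some la := by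
        rwa [List.getLast?_cons_cons] at hl
      have : (x :: x2 :: t2) ++ q = x :: ((x2 :: t2) ++ q) := by simp
      rw [this, List.cons_append, pv_pathOk_cons, ← List.cons_append,
          ih q la hb hl' hh, pv_pathOk_cons]
      cases pvA_get T x x2 == 1 <;> simp

-- every generated permutation has the length of its source
theorem pv_perms_length : ∀ (N : Nat) (l : List Int), l.length ≤ N →
    ∀ p ∈ pvA_perms l, p.length = l.length := by
  intro N
  induction N with
  | zero =>
    intro l hl p hp
    have : l = [] := List.eq_nil_of_length_eq_zero (Nat.le_zero.mp hl)
    subst this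
    simp only [pvA_perms, List.mem_singleton] at hp
    simp [hp]
  | succ N ih =>
    intro l hl p hp
    cases l with
    | nil =>
      simp only [pvA_perms, List.mem_singleton] at hp
      simp [hp]
    | cons x0 rest =>
      simp only [pvA_perms, List.mem_flatMap, List.mem_map, List.mem_attach,
        true_and] at hp
      obtain ⟨x, ⟨p', hp', rfl⟩⟩ := hp
      have hx : x.1 ∈ x0 :: rest := x.2
      have herase : ((x0 :: rest).erase x.1).length = rest.length := by
        rw [List.length_erase_of_mem hx]; simp
      have : p'.length = ((x0 :: rest).erase x.1).length :=
        ih _ (by rw [herase]; simpa using Nat.lt_succ_iff.mp (by simpa using hl)) p' hp'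
      simp [this, herase]

-- the two core counting lemmas: the signed 0/1 sum over all generated
-- permutations equals B's recursive count
theorem pv_cntTo (T : List (List Int × Int)) (target : Int) :
    ∀ (N : Nat) (l : List Int), l.length ≤ N → l.Nodup → ∀ prev,
    ((pvA_perms l).map (fun p =>
        if ((prev :: p).getLast? == some target) && pvA_pathOk T (prev :: p)
        then (1 : Int) else 0)).sum = pvB_countTo T target l prev := by
  intro N
  induction N with
  | zero =>
    intro l hl _ prev
    have : l = [] := List.eq_nil_of_length_eq_zero (Nat.le_zero.mp hl)
    subst this
    simp [pvA_perms, pvB_countTo, pv_pathOk_single]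
  | succ N ih =>
    intro l hl hnd prev
    cases l with
    | nil => simp [pvA_perms, pvB_countTo, pv_pathOk_single]
    | cons x0 rest =>
      rw [show pvA_perms (x0 :: rest) = (x0 :: rest).attach.flatMap
            (fun x => (pvA_perms ((x0 :: rest).erase x.1)).map (x.1 :: ·)) from by
          rw [pvA_perms]]
      rw [pv_sum_flatMap]
      rw [show pvB_countTo T target (x0 :: rest) prev
            = ((x0 :: rest).attach.map (fun x =>
                if pvB_edge T prev x.1 then
                  pvB_countTo T target ((x0 :: rest).filter (fun y => y != x.1)) x.1
                else 0)).sum from by rw [pvB_countTo]]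
      congr 1
      apply List.map_congr_left
      rintro ⟨x, hx⟩ _
      simp only [List.map_map]
      have hfe : (x0 :: rest).filter (fun y => y != x) = (x0 :: rest).erase x :=
        (List.Nodup.erase_eq_filter hnd x).symm
      have hlen : ((x0 :: rest).erase x).length ≤ N := by
        rw [List.length_erase_of_mem hx]
        simpa using Nat.lt_succ_iff.mp (by simpa using hl)
      have hnd' : ((x0 :: rest).erase x).Nodup := List.Nodup.erase x hnd
      have key := ih ((x0 :: rest).erase x) hlen hnd' x
      rw [hfe]
      by_cases he : pvB_edge T prev x = true
      · rw [if_pos he, ← key]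
        congr 1
        apply List.map_congr_left
        intro p _
        have hget : (pvA_get T prev x == 1) = true := by
          simpa [pvB_edge, pvA_get] using he
        simp [pv_pathOk_cons, List.getLast?_cons_cons, hget]
      · rw [if_neg he]
        have hget : (pvA_get T prev x == 1) = false := by
          simpa [pvB_edge, pvA_get] using (Bool.not_eq_true _).mp he
        have : ∀ p ∈ pvA_perms ((x0 :: rest).erase x),
            ((fun p => if ((prev :: p).getLast? == some target)
                && pvA_pathOk T (prev :: p) then (1:Int) else 0) ∘ (x :: ·)) p = 0 := by
          intro p _
          simp [pv_pathOk_cons, hget]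
        rw [List.map_congr_left this]
        simp

theorem pv_cntFrom (T : List (List Int × Int)) :
    ∀ (N : Nat) (l : List Int), l.length ≤ N → l.Nodup → ∀ prev,
    ((pvA_perms l).map (fun p =>
        if pvA_pathOk T (prev :: p) then (1 : Int) else 0)).sum
      = pvB_countFrom T l prev := by
  intro N
  induction N with
  | zero =>
    intro l hl _ prev
    have : l = [] := List.eq_nil_of_length_eq_zero (Nat.le_zero.mp hl)
    subst this
    simp [pvA_perms, pvB_countFrom, pv_pathOk_single]
  | succ N ih =>
    intro l hl hnd prev
    cases l with
    | nil => simp [pvA_perms, pvB_countFrom, pv_pathOk_single]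
    | cons x0 rest =>
      rw [show pvA_perms (x0 :: rest) = (x0 :: rest).attach.flatMap
            (fun x => (pvA_perms ((x0 :: rest).erase x.1)).map (x.1 :: ·)) from by
          rw [pvA_perms]]
      rw [pv_sum_flatMap]
      rw [show pvB_countFrom T (x0 :: rest) prev
            = ((x0 :: rest).attach.map (fun x =>
                if pvB_edge T prev x.1 then
                  pvB_countFrom T ((x0 :: rest).filter (fun y => y != x.1)) x.1
                else 0)).sum from by rw [pvB_countFrom]]
      congr 1
      apply List.map_congr_left
      rintro ⟨x, hx⟩ _
      simp only [List.map_map]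
      have hfe : (x0 :: rest).filter (fun y => y != x) = (x0 :: rest).erase x :=
        (List.Nodup.erase_eq_filter hnd x).symm
      have hlen : ((x0 :: rest).erase x).length ≤ N := by
        rw [List.length_erase_of_mem hx]
        simpa using Nat.lt_succ_iff.mp (by simpa using hl)
      have hnd' : ((x0 :: rest).erase x).Nodup := List.Nodup.erase x hnd
      have key := ih ((x0 :: rest).erase x) hlen hnd' x
      rw [hfe]
      by_cases he : pvB_edge T prev x = true
      · rw [if_pos he, ← key]
        congr 1
        apply List.map_congr_left
        intro p _
        have hget : (pvA_get T prev x == 1) = true := by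
          simpa [pvB_edge, pvA_get] using he
        simp [pv_pathOk_cons, hget]
      · rw [if_neg he]
        have hget : (pvA_get T prev x == 1) = false := by
          simpa [pvB_edge, pvA_get] using (Bool.not_eq_true _).mp he
        have : ∀ p ∈ pvA_perms ((x0 :: rest).erase x),
            ((fun p => if pvA_pathOk T (prev :: p) then (1:Int) else 0) ∘ (x :: ·)) p = 0 := by
          intro p _
          simp [pv_pathOk_cons, hget]
        rw [List.map_congr_left this]
        simp

theorem pv_bf {x : Bool} (h : ¬ x = true) : x = false := by simpa using h

theorem pv_edge_eq (T : List (List Int × Int)) (u v : Int) :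
    pvB_edge T u v = (pvA_get T u v == 1) := rfl

-- #valid p over all permutations of sa = B's P-sum
theorem pv_pcount (T : List (List Int × Int)) (a : Int) (sa : List Int)
    (hn : sa.Nodup) (ha : a ∈ sa) :
    ((pvA_perms sa).map (fun p =>
        if (p.getLast? == some a) && pvA_pathOk T p then (1 : Int) else 0)).sum
    = (sa.map (fun x => pvB_countTo T a (sa.filter (fun y => y != x)) x)).sum := by
  obtain ⟨x0, rest, rfl⟩ := List.exists_cons_of_ne_nil (l := sa) (List.ne_nil_of_mem ha)
  rw [show pvA_perms (x0 :: rest) = (x0 :: rest).attach.flatMap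
        (fun x => (pvA_perms ((x0 :: rest).erase x.1)).map (x.1 :: ·)) from by
      rw [pvA_perms]]
  rw [pv_sum_flatMap]
  have step1 : ((x0 :: rest).attach.map (fun x =>
      (((pvA_perms ((x0 :: rest).erase x.1)).map (x.1 :: ·)).map (fun p =>
        if (p.getLast? == some a) && pvA_pathOk T p then (1 : Int) else 0)).sum)).sum
    = ((x0 :: rest).attach.map (fun x =>
        pvB_countTo T a ((x0 :: rest).erase x.1) x.1)).sum := by
    congr 1
    apply List.map_congr_left
    rintro ⟨x, hx⟩ _
    have hlen : ((x0 :: rest).erase x).length ≤ rest.length := by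
      rw [List.length_erase_of_mem hx]; simp
    rw [← pv_cntTo T a rest.length ((x0 :: rest).erase x) hlen (List.Nodup.erase x hn) x]
    simp [Function.comp_def]
  rw [step1, List.attach_map_val (l := x0 :: rest)
    (f := fun x => pvB_countTo T a ((x0 :: rest).erase x) x)]
  congr 1
  apply List.map_congr_left
  intro x _
  rw [List.Nodup.erase_eq_filter hn x]

-- #valid q over all permutations of rb = B's Q count
theorem pv_qcount (T : List (List Int × Int)) (b : Int) (rb : List Int)
    (hn : rb.Nodup) (hb : b ∈ rb) :
    ((pvA_perms rb).map (fun q =>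
        if (q.head? == some b) && pvA_pathOk T q then (1 : Int) else 0)).sum
    = pvB_countFrom T (rb.filter (fun y => y != b)) b := by
  obtain ⟨x0, rest, rfl⟩ := List.exists_cons_of_ne_nil (l := rb) (List.ne_nil_of_mem hb)
  rw [show pvA_perms (x0 :: rest) = (x0 :: rest).attach.flatMap
        (fun x => (pvA_perms ((x0 :: rest).erase x.1)).map (x.1 :: ·)) from by
      rw [pvA_perms]]
  rw [pv_sum_flatMap]
  have step1 : ((x0 :: rest).attach.map (fun x =>
      (((pvA_perms ((x0 :: rest).erase x.1)).map (x.1 :: ·)).map (fun q =>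
        if (q.head? == some b) && pvA_pathOk T q then (1 : Int) else 0)).sum)).sum
    = ((x0 :: rest).attach.map (fun x => if x.1 == b then
        pvB_countFrom T ((x0 :: rest).erase b) b else 0)).sum := by
    congr 1
    apply List.map_congr_left
    rintro ⟨x, hx⟩ _
    by_cases hxb : x = b
    · subst hxb
      rw [if_pos (by simp)]
      have hlen : ((x0 :: rest).erase x).length ≤ rest.length := by
        rw [List.length_erase_of_mem hx]; simp
      rw [← pv_cntFrom T rest.length ((x0 :: rest).erase x) hlen (List.Nodup.erase x hn) x]
      simp [Function.comp_def]
    · rw [if_neg (by simpa using hxb)]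
      have : ∀ p ∈ pvA_perms ((x0 :: rest).erase x),
          ((fun q => if (q.head? == some b) && pvA_pathOk T q then (1:Int) else 0)
            ∘ (x :: ·)) p = 0 := by
        intro p _
        simp [hxb]
      rw [List.map_map, List.map_congr_left this]
      simp
  rw [step1, List.attach_map_val (l := x0 :: rest)
      (f := fun y => if y == b then pvB_countFrom T ((x0 :: rest).erase b) b else 0),
    pv_sum_single b (pvB_countFrom T ((x0 :: rest).erase b) b) (x0 :: rest) hn hb,
    List.Nodup.erase_eq_filter hn b]

-- per-mask reduction: A's double permutation loop = signed product of B's counts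
theorem pv_perMask (T : List (List Int × Int)) (a b sign : Int) (sa rb : List Int)
    (hsa : sa.Nodup) (hrb : rb.Nodup) (ha : a ∈ sa) (hb : b ∈ rb) (acc : Int) :
    (pvA_perms sa).foldl (fun acc2 p =>
      if PySem.List.pyGetD p (-1) 0 != a then acc2
      else if !(pvA_pathOk T p) then acc2
      else (pvA_perms rb).foldl (fun acc3 q =>
        if PySem.List.pyGetD q 0 0 != b then acc3
        else if !(pvA_pathOk T q) then acc3
        else if !(pvA_pathOk T (p ++ q)) then acc3 + sign else acc3) acc2) acc
    = acc + (if pvB_edge T a b then 0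
        else sign * (sa.map (fun x =>
              pvB_countTo T a (sa.filter (fun y => y != x)) x)).sum
            * pvB_countFrom T (rb.filter (fun y => y != b)) b) := by
  have hpne : ∀ p ∈ pvA_perms sa, p ≠ [] := by
    intro p hp h0
    have hl := pv_perms_length sa.length sa le_rfl p hp
    rw [h0] at hl
    exact List.ne_nil_of_mem ha (List.eq_nil_of_length_eq_zero hl.symm)
  have hqne : ∀ q ∈ pvA_perms rb, q ≠ [] := by
    intro q hq h0
    have hl := pv_perms_length rb.length rb le_rfl q hq
    rw [h0] at hl
    exact List.ne_nil_of_mem hb (List.eq_nil_of_length_eq_zero hl.symm)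
  -- outer foldl → sum
  rw [pv_foldl_eq (pvA_perms sa) _ (fun p =>
      if (PySem.List.pyGetD p (-1) 0 == a) && pvA_pathOk T p then
        ((pvA_perms rb).map (fun q =>
          if (PySem.List.pyGetD q 0 0 == b) && pvA_pathOk T q
              && !(pvA_pathOk T (p ++ q)) then sign else 0)).sum
      else 0)]
  · congr 1
    by_cases heAB : pvB_edge T a b = true
    · -- edge a→b present: every pair is Hamiltonian, the sum is 0
      rw [if_pos heAB]
      have hz : ∀ p ∈ pvA_perms sa,
          (if (PySem.List.pyGetD p (-1) 0 == a) && pvA_pathOk T p then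
            ((pvA_perms rb).map (fun q =>
              if (PySem.List.pyGetD q 0 0 == b) && pvA_pathOk T q
                  && !(pvA_pathOk T (p ++ q)) then sign else 0)).sum
          else 0) = 0 := by
        intro p hp
        by_cases hc : ((PySem.List.pyGetD p (-1) 0 == a) && pvA_pathOk T p) = true
        · rw [if_pos hc]
          have hc2 : (PySem.List.pyGetD p (-1) 0 == a) = true ∧ pvA_pathOk T p = true := by
            simpa using hc
          have hpOk : pvA_pathOk T p = true := hc2.2
          have hlast : p.getLast? = some a := by
            have h1 := hc2.1
            rw [PySem.List.pyGetD_neg_one p 0 (hpne p hp)] at h1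
            rw [List.getLast?_eq_some_getLast (hpne p hp)]
            simpa using h1
          have hqz : ∀ q ∈ pvA_perms rb,
              (if (PySem.List.pyGetD q 0 0 == b) && pvA_pathOk T q
                  && !(pvA_pathOk T (p ++ q)) then sign else 0) = 0 := by
            intro q hq
            obtain ⟨y, q', rfl⟩ := List.exists_cons_of_ne_nil (hqne q hq)
            by_cases hyb : ((y : Int) == b) = true
            · by_cases hqOk : pvA_pathOk T (y :: q') = true
              · have hham : pvA_pathOk T (p ++ y :: q') = true := by
                  rw [pv_pathOk_append T p (y :: q') a y hlast (by simp),
                    hpOk, hqOk]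
                  have : (pvA_get T a y == 1) = true := by
                    rw [show (y : Int) = b from by simpa using hyb]
                    rw [← pv_edge_eq]; exact heAB
                  simp [this]
                simp [hham]
              · simp [pv_bf hqOk]
            · simp [PySem.List.pyGetD_zero_cons, pv_bf hyb]
          rw [List.map_congr_left hqz]
          simp
        · rw [if_neg hc]
      rw [List.map_congr_left hz]
      simp
    · -- edge absent: no concatenation is Hamiltonian
      rw [if_neg heAB]
      have heF : pvB_edge T a b = false := pv_bf heAB
      set Qc := pvB_countFrom T (rb.filter (fun y => y != b)) b with hQc
      have hg : ∀ p ∈ pvA_perms sa,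
          (if (PySem.List.pyGetD p (-1) 0 == a) && pvA_pathOk T p then
            ((pvA_perms rb).map (fun q =>
              if (PySem.List.pyGetD q 0 0 == b) && pvA_pathOk T q
                  && !(pvA_pathOk T (p ++ q)) then sign else 0)).sum
          else 0)
          = (if (p.getLast? == some a) && pvA_pathOk T p then (1:Int) else 0)
              * (sign * Qc) := by
        intro p hp
        have hcceq : ((p.getLast? == some a) && pvA_pathOk T p)
            = ((PySem.List.pyGetD p (-1) 0 == a) && pvA_pathOk T p) := by
          rw [PySem.List.pyGetD_neg_one p 0 (hpne p hp),
            List.getLast?_eq_some_getLast (hpne p hp)]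
          simp
        rw [hcceq]
        by_cases hc : ((PySem.List.pyGetD p (-1) 0 == a) && pvA_pathOk T p) = true
        · rw [if_pos hc, if_pos hc, one_mul]
          have hc2 : (PySem.List.pyGetD p (-1) 0 == a) = true ∧ pvA_pathOk T p = true := by
            simpa using hc
          have hpOk : pvA_pathOk T p = true := hc2.2
          have hlast : p.getLast? = some a := by
            have h1 := hc2.1
            rw [PySem.List.pyGetD_neg_one p 0 (hpne p hp)] at h1
            rw [List.getLast?_eq_some_getLast (hpne p hp)]
            simpa using h1
          have hw : ∀ q ∈ pvA_perms rb,
              (if (PySem.List.pyGetD q 0 0 == b) && pvA_pathOk T q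
                  && !(pvA_pathOk T (p ++ q)) then sign else 0)
              = sign * (if (q.head? == some b) && pvA_pathOk T q then (1:Int) else 0) := by
            intro q hq
            obtain ⟨y, q', rfl⟩ := List.exists_cons_of_ne_nil (hqne q hq)
            by_cases hyb : ((y : Int) == b) = true
            · by_cases hqOk : pvA_pathOk T (y :: q') = true
              · have hham : pvA_pathOk T (p ++ y :: q') = false := by
                  rw [pv_pathOk_append T p (y :: q') a y hlast (by simp)]
                  have : (pvA_get T a y == 1) = false := by
                    rw [show (y : Int) = b from by simpa using hyb, ← pv_edge_eq]
                    exact heF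
                  simp [this]
                simp [hham, hyb, hqOk, PySem.List.pyGetD_zero_cons]
              · have hq' : pvA_pathOk T (y :: q') = false := pv_bf hqOk
                simp [hq']
            · have hyb' : ((y : Int) == b) = false := pv_bf hyb
              simp [PySem.List.pyGetD_zero_cons, hyb']
          rw [List.map_congr_left hw, List.sum_map_mul_left, pv_qcount T b rb hrb hb]
        · rw [if_neg hc, if_neg hc, zero_mul]
      rw [List.map_congr_left hg, List.sum_map_mul_right, pv_pcount T a sa hsa ha]
      ring
  · -- pointwise foldl-body = acc + g
    intro acc2 p
    by_cases h1 : (PySem.List.pyGetD p (-1) 0 == a) = true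
    · by_cases h2 : pvA_pathOk T p = true
      · rw [if_neg (by simp [bne, h1]), if_neg (by simp [h2])]
        rw [pv_foldl_eq (pvA_perms rb) _ (fun q =>
          if (PySem.List.pyGetD q 0 0 == b) && pvA_pathOk T q
              && !(pvA_pathOk T (p ++ q)) then sign else 0)]
        · rw [if_pos (by simp [h1, h2])]
        · intro acc3 q
          by_cases g1 : (PySem.List.pyGetD q 0 0 == b) = true
          · by_cases g2 : pvA_pathOk T q = true
            · by_cases g3 : pvA_pathOk T (p ++ q) = true
              · rw [if_neg (by simp [bne, g1]), if_neg (by simp [g2]),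
                  if_neg (by simp [g3]), if_neg (by simp [g1, g2, g3])]
                ring
              · have g3' := pv_bf g3
                rw [if_neg (by simp [bne, g1]), if_neg (by simp [g2]),
                  if_pos (by simp [g3']), if_pos (by simp [g1, g2, g3'])]
            · have g2' := pv_bf g2
              rw [if_neg (by simp [bne, g1]), if_pos (by simp [g2']),
                if_neg (by simp [g2'])]
              ring
          · have g1' := pv_bf g1
            rw [if_pos (by simp [bne, g1']), if_neg (by simp [g1'])]
            ring
      · have h2' := pv_bf h2
        rw [if_neg (by simp [bne, h1]), if_pos (by simp [h2']),
          if_neg (by simp [h2'])]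
        ring
    · have h1' := pv_bf h1
      rw [if_pos (by simp [bne, h1']), if_neg (by simp [h1'])]
      ring

-- sorted(set(xs) | {c}) is duplicate-free and contains c
theorem pv_sortedSet_nodup (xs : List Int) (c : Int) :
    (PySem.List.sorted (PySem.Set.union (PySem.Set.ofList xs) [c]) (fun x => x) false).Nodup :=
  (List.Perm.nodup_iff
    (PySem.List.sorted_perm (PySem.Set.union (PySem.Set.ofList xs) [c]) (fun x => x) false)).mpr
    (PySem.Set.nodup_union (PySem.Set.ofList xs) [c] (PySem.Set.nodup_ofList xs))

theorem pv_sortedSet_mem (xs : List Int) (c : Int) :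
    c ∈ PySem.List.sorted (PySem.Set.union (PySem.Set.ofList xs) [c]) (fun x => x) false := by
  rw [PySem.List.mem_sorted]
  exact (PySem.Set.mem_union (PySem.Set.ofList xs) [c] c).mpr (Or.inr (by simp))

-- ===== VERDICT (by name: the statement is the Claim_ definition above) =====
theorem check_nonham_for_pair_spec : Claim_equal_check_nonham_for_pair := by
  intro T n a b _
  unfold Spec_check_nonham_for_pair
  simp only [check_nonham_for_pair, check_nonham_for_pair_alt]
  set U := (PySem.List.pyRange 0 n 1).filter (fun v => v != a && v != b) with hU
  by_cases heAB : pvB_edge T a b = true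
  · rw [if_pos heAB]
    refine Eq.trans (pv_foldl_eq _ _ (fun _ : Nat => (0 : Int)) ?_ 0) ?_
    · intro acc mask
      rw [pv_perMask T a b _ _ _ (pv_sortedSet_nodup _ a) (pv_sortedSet_nodup _ b)
        (pv_sortedSet_mem _ a) (pv_sortedSet_mem _ b) acc, if_pos heAB]
    · simp
  · rw [if_neg heAB]
    refine Eq.trans (pv_foldl_eq _ _ _ ?_ 0)
      (Eq.symm (pv_foldl_eq _ _ _ (fun acc mask => rfl) 0))
    intro acc mask
    rw [pv_perMask T a b _ _ _ (pv_sortedSet_nodup _ a) (pv_sortedSet_nodup _ b)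
      (pv_sortedSet_mem _ a) (pv_sortedSet_mem _ b) acc, if_neg heAB]
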